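-- pv_equiv track=rewrite | github.com/ychen99/emotion_recognition | pre_processing.py | split_arithmetic_sequence
-- ===== SOURCE A (Python) =====
-- def split_arithmetic_sequence(arr):
--     if len(arr) < 2:  # No need to split if the array is too short
--         return [arr]
--
--     sequences = []  # List to hold the result sequences
--     current_sequence = [arr[0]]  # Start the first sequence with the first element
--
--     for i in range(1, len(arr)):
--         if len(current_sequence) >= 2:
--             # Check if the current element continues the arithmetic sequence
--             if arr[i] - current_sequence[-1] == current_sequence[1] - current_sequence[0]:
--                 current_sequence.append(arr[i])
--             else:
--                 # If not, add the current sequence to the list and start a new sequence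
--                 sequences.append(current_sequence)
--                 current_sequence = [arr[i]]
--         else:
--             current_sequence.append(arr[i])
--
--     # Add the last sequence to the list if not empty
--     if current_sequence:
--         sequences.append(current_sequence)
--
--     return sequences
-- ===== SOURCE B (Python) =====
-- def split_arithmetic_sequence(arr):
--     # Pointer walk: repeatedly cut off the maximal run sharing one common difference.
--     if len(arr) < 2:
--         return [arr]
--     res = []
--     n = len(arr)
--     start = 0
--     while n - start >= 2:
--         d = arr[start + 1] - arr[start]
--         j = start + 2
--         while j < n and arr[j] - arr[j - 1] == d:
--             j += 1
--         res.append(arr[start:j])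
--         start = j
--     if start < n:
--         res.append(arr[start:])
--     return res
-- ===== Notes on version B (the rewrite author's own statement) =====
-- stated objective: alternative
-- what changed: A maintains a (sequences, current_sequence) state machine updated element by element; B repeatedly slices off one maximal run at a time with an inner pointer scan for the run's end, so no per-element run state is carried.
import Mathlib
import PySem

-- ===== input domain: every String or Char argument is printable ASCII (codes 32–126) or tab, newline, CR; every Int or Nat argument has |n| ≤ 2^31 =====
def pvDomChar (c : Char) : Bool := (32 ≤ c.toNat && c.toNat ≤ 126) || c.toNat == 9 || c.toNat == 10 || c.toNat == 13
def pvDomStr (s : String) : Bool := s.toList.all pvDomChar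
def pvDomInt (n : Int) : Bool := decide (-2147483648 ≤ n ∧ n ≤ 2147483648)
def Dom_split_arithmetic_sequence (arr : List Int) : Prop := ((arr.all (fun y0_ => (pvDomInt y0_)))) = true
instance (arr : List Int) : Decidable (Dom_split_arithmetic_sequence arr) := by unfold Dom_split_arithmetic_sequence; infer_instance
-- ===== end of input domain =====

-- B cuts off one maximal-run slice at a time with an inner pointer scan instead of A's
-- element-by-element state machine; same cost, different decomposition (objective: alternative).

-- ===== PORT A =====
-- loop body of A's for-loop: state = (sequences, current_sequence)
def pvAStep (st : List (List Int) × List Int) (a : Int) : List (List Int) × List Int :=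
  let seqs := st.1
  let cur := st.2
  if 2 ≤ cur.length then
    if a - PySem.List.pyGetD cur (-1) 0 = PySem.List.pyGetD cur 1 0 - PySem.List.pyGetD cur 0 0 then
      (seqs, cur ++ [a])
    else
      (seqs ++ [cur], [a])
  else
    (seqs, cur ++ [a])

def split_arithmetic_sequence (arr : List Int) : List (List Int) :=
  if PySem.List.len arr < 2 then [arr]
  else
    let st := (PySem.List.pyRange 1 (PySem.List.len arr) 1).foldl
      (fun st i => pvAStep st (PySem.List.pyGetD arr i 0)) ([], [PySem.List.pyGetD arr 0 0])
    if st.2 ≠ [] then st.1 ++ [st.2] else st.1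

-- ===== PORT B =====
-- inner while loop: advance j while j < len(arr) and arr[j] - arr[j-1] == d
def pvScan (arr : List Int) (d : Int) (j : Nat) : Nat :=
  if j < arr.length then
    if PySem.List.pyGetD arr (j : Int) 0 - PySem.List.pyGetD arr ((j : Int) - 1) 0 = d then
      pvScan arr d (j + 1)
    else j
  else j
termination_by arr.length - j

-- cited by pvBIdx's decreasing_by (the scan never moves the pointer backwards)
theorem pvScan_ge (arr : List Int) (d : Int) : ∀ j, j ≤ pvScan arr d j := by
  intro j
  rw [pvScan]
  split
  · split
    · have := pvScan_ge arr d (j + 1)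
      omega
    · exact Nat.le_refl j
  · exact Nat.le_refl j
termination_by j => arr.length - j

-- outer while loop: start = index of the first element not yet emitted
def pvBIdx (arr : List Int) (res : List (List Int)) (start : Nat) : List (List Int) :=
  if _h2 : 2 ≤ arr.length - start then
    let d := PySem.List.pyGetD arr ((start : Int) + 1) 0 - PySem.List.pyGetD arr (start : Int) 0
    let j := pvScan arr d (start + 2)
    pvBIdx arr (res ++ [PySem.List.slice arr (some (start : Int)) (some (j : Int))]) j
  else
    if start < arr.length then res ++ [PySem.List.slice arr (some (start : Int)) none] else res
termination_by arr.length - start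
decreasing_by
  have := pvScan_ge arr
    (PySem.List.pyGetD arr ((start : Int) + 1) 0 - PySem.List.pyGetD arr (start : Int) 0) (start + 2)
  omega

def split_arithmetic_sequence_alt (arr : List Int) : List (List Int) :=
  if arr.length < 2 then [arr] else pvBIdx arr [] 0

-- ===== PRECONDITION & SPEC =====
def Spec_split_arithmetic_sequence (arr : List Int) (out : List (List Int)) : Prop := out = split_arithmetic_sequence_alt arr
instance (arr : List Int) (out : List (List Int)) : Decidable (Spec_split_arithmetic_sequence arr out) := by unfold Spec_split_arithmetic_sequence; infer_instance

-- ===== CLAIM (what is proved, stated in full; the proofs are below) =====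
def Claim_equal_split_arithmetic_sequence : Prop := ∀ (arr : List Int), Dom_split_arithmetic_sequence arr → Spec_split_arithmetic_sequence arr (split_arithmetic_sequence arr)

-- ===== LEMMAS AND PROOFS =====

-- intermediate description of B's outer loop, phrased on the remaining suffix itself
def pvExt (prev d : Int) (l : List Int) : Nat :=
  match l with
  | [] => 0
  | z :: zs => if z - prev = d then 1 + pvExt z d zs else 0

def pvBLoop (res : List (List Int)) (rest : List Int) : List (List Int) :=
  match rest with
  | x :: y :: tl =>
      let k := 2 + pvExt y (y - x) tl
      pvBLoop (res ++ [(x :: y :: tl).take k]) ((x :: y :: tl).drop k)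
  | _ => if rest ≠ [] then res ++ [rest] else res
termination_by rest.length
decreasing_by simp only [List.length_drop, List.length_cons]; omega


-- A's final "append current_sequence if nonempty"
def pvPost (st : List (List Int) × List Int) : List (List Int) :=
  if st.2 ≠ [] then st.1 ++ [st.2] else st.1

-- what A's loop yields after the current run is maximally extended: d = the unconsumed suffix
def pvCont (seqs : List (List Int)) (whole closed : List Int) (d : List Int) : List (List Int) :=
  match d with
  | [] => seqs ++ [whole]
  | z :: rest => pvPost (rest.foldl pvAStep (seqs ++ [closed], [z]))

theorem pvLast : ∀ (t : List Int) (y x : Int), (x :: y :: t).getLast (by simp) = t.getLastD y := by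
  intro t
  induction t with
  | nil => intro y x; rfl
  | cons a t ih => intro y x; rw [List.getLast_cons (by simp), List.getLastD_cons]; exact ih a y

-- one step of A's loop while the current run x::y::t continues (p = last element)
theorem pvStep_cont (seqs : List (List Int)) (x y z p : Int) (t : List Int)
    (hp : t.getLastD y = p) (h : z - p = y - x) :
    pvAStep (seqs, x :: y :: t) z = (seqs, x :: y :: (t ++ [z])) := by
  have hlast : PySem.List.pyGetD (x :: y :: t) (-1) 0 = p := by
    rw [PySem.List.pyGetD_neg_one _ _ (List.cons_ne_nil _ _), pvLast]
    exact hp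
  have h1 : PySem.List.pyGetD (x :: y :: t) 1 0 = y := by simp [pysem]
  simp [pvAStep, hlast, h1, h]

-- one step of A's loop when the run breaks
theorem pvStep_break (seqs : List (List Int)) (x y z p : Int) (t : List Int)
    (hp : t.getLastD y = p) (h : ¬ z - p = y - x) :
    pvAStep (seqs, x :: y :: t) z = (seqs ++ [x :: y :: t], [z]) := by
  have hlast : PySem.List.pyGetD (x :: y :: t) (-1) 0 = p := by
    rw [PySem.List.pyGetD_neg_one _ _ (List.cons_ne_nil _ _), pvLast]
    exact hp
  have h1 : PySem.List.pyGetD (x :: y :: t) 1 0 = y := by simp [pysem]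
  simp [pvAStep, hlast, h1, h]

-- core invariant: running A's loop from a current run x::y::t (with last element p) either
-- absorbs the whole rest, or closes the run exactly after pvExt-many matching steps
theorem pvRunLemma : ∀ (l t : List Int) (x y p : Int) (seqs : List (List Int)),
    t.getLastD y = p →
    pvPost (l.foldl pvAStep (seqs, x :: y :: t)) =
      pvCont seqs (x :: y :: (t ++ l)) (x :: y :: (t ++ l.take (pvExt p (y - x) l)))
        (l.drop (pvExt p (y - x) l)) := by
  intro l
  induction l with
  | nil =>
    intro t x y p seqs hp
    simp [pvExt, pvPost, pvCont]
  | cons z zs ih =>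
    intro t x y p seqs hp
    by_cases hz : z - p = y - x
    · have hext : pvExt p (y - x) (z :: zs) = pvExt z (y - x) zs + 1 := by
        simp [pvExt, hz]; omega
      simp only [List.foldl_cons, pvStep_cont seqs x y z p t hp hz, hext]
      rw [ih (t ++ [z]) x y z seqs (by simp)]
      simp only [List.take_succ_cons, List.drop_succ_cons, List.append_assoc, List.cons_append,
        List.nil_append]
    · have hext : pvExt p (y - x) (z :: zs) = 0 := by simp [pvExt, hz]
      simp only [List.foldl_cons, pvStep_break seqs x y z p t hp hz, hext, List.take_zero,
        List.drop_zero, List.append_nil, pvCont]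

-- A's loop from a fresh two-element run equals B's outer loop on the same suffix
theorem pvMainLemma : ∀ (n : Nat) (l : List Int) (x y : Int) (seqs : List (List Int)),
    l.length ≤ n →
    pvPost (l.foldl pvAStep (seqs, [x, y])) = pvBLoop seqs (x :: y :: l) := by
  intro n
  induction n with
  | zero =>
    intro l x y seqs hl
    have h0 : l = [] := List.eq_nil_of_length_eq_zero (by omega)
    subst h0
    simp [pvPost, pvBLoop, pvExt]
  | succ n ih =>
    intro l x y seqs hl
    rw [pvRunLemma l [] x y y seqs rfl]
    conv_rhs => rw [pvBLoop]
    have htake : (x :: y :: l).take (2 + pvExt y (y - x) l) = x :: y :: l.take (pvExt y (y - x) l) := by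
      rw [show 2 + pvExt y (y - x) l = (pvExt y (y - x) l + 1) + 1 by omega]
      simp [List.take_succ_cons]
    have hdrop : (x :: y :: l).drop (2 + pvExt y (y - x) l) = l.drop (pvExt y (y - x) l) := by
      rw [show 2 + pvExt y (y - x) l = (pvExt y (y - x) l + 1) + 1 by omega]
      simp [List.drop_succ_cons]
    rw [htake, hdrop]
    cases hd : l.drop (pvExt y (y - x) l) with
    | nil =>
      have hlen : l.length ≤ pvExt y (y - x) l := by
        have h1 := congrArg List.length hd
        simp at h1
        omega
      rw [List.take_of_length_le hlen]
      simp [pvCont, pvBLoop]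
    | cons z rest =>
      have hlen2 : pvExt y (y - x) l + rest.length + 1 = l.length := by
        have h1 := congrArg List.length hd
        simp at h1
        omega
      simp only [pvCont, List.nil_append]
      cases rest with
      | nil => simp [pvPost, pvBLoop]
      | cons r rs =>
        have hstep1 : pvAStep (seqs ++ [x :: y :: l.take (pvExt y (y - x) l)], [z]) r =
            (seqs ++ [x :: y :: l.take (pvExt y (y - x) l)], [z, r]) := by
          simp [pvAStep]
        rw [List.foldl_cons, hstep1, ih rs z r _ (by simp only [List.length_cons] at hlen2; omega)]


-- the index scan counts exactly pvExt further matching differences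
theorem pvScan_spec (arr : List Int) (d : Int) : ∀ j, 1 ≤ j →
    pvScan arr d j = j + pvExt (arr.getD (j - 1) 0) d (arr.drop j) := by
  intro j hj
  rw [pvScan]
  by_cases hlt : j < arr.length
  · have hdrop : arr.drop j = arr[j] :: arr.drop (j + 1) := (List.getElem_cons_drop hlt).symm
    have hget : PySem.List.pyGetD arr (j : Int) 0 = arr[j] := by
      simp [PySem.List.pyGetD_natCast, List.getD_eq_getElem?_getD, List.getElem?_eq_getElem hlt]
    have hcast : ((j : Int) - 1) = ((j - 1 : Nat) : Int) := by omega
    have hget1 : PySem.List.pyGetD arr ((j : Int) - 1) 0 = arr.getD (j - 1) 0 := by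
      rw [hcast, PySem.List.pyGetD_natCast]
    rw [if_pos hlt, hget, hget1, hdrop]
    by_cases hc : arr[j] - arr.getD (j - 1) 0 = d
    · rw [if_pos hc, pvScan_spec arr d (j + 1) (by omega)]
      have h5 : arr.getD (j + 1 - 1) 0 = arr[j] := by
        rw [show j + 1 - 1 = j by omega, List.getD_eq_getElem?_getD, List.getElem?_eq_getElem hlt]
        rfl
      rw [h5]
      have hc' : arr[j] - arr[j - 1]?.getD 0 = d := by
        rwa [List.getD_eq_getElem?_getD] at hc
      simp [pvExt, hc']
      omega
    · rw [if_neg hc]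
      have hc' : ¬ arr[j] - arr[j - 1]?.getD 0 = d := by
        rwa [List.getD_eq_getElem?_getD] at hc
      simp [pvExt, hc']
  · rw [if_neg hlt, List.drop_eq_nil_of_le (by omega)]
    simp [pvExt]
termination_by j => arr.length - j

-- B's index loop computes the suffix-phrased loop on the remaining suffix
theorem pvBridge (arr : List Int) : ∀ (n start : Nat) (res : List (List Int)),
    arr.length - start ≤ n →
    pvBIdx arr res start = pvBLoop res (arr.drop start) := by
  intro n
  induction n with
  | zero =>
    intro start res hn
    rw [pvBIdx, dif_neg (by omega), if_neg (by omega), List.drop_eq_nil_of_le (by omega)]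
    simp [pvBLoop]
  | succ n ih =>
    intro start res hn
    by_cases h2 : 2 ≤ arr.length - start
    · obtain ⟨x, y, tl, hd⟩ : ∃ x y tl, arr.drop start = x :: y :: tl := by
        cases hd : arr.drop start with
        | nil => have := congrArg List.length hd; simp at this; omega
        | cons a t =>
          cases t with
          | nil => have := congrArg List.length hd; simp at this; omega
          | cons b t2 => exact ⟨a, b, t2, rfl⟩
      have h1 : arr.drop (start + 1) = y :: tl := by
        rw [← List.drop_drop (i := 1) (j := start), hd]
        rfl
      have htl : arr.drop (start + 2) = tl := by
        rw [show start + 2 = start + 1 + 1 by omega, ← List.drop_drop (i := 1) (j := start + 1), h1]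
        rfl
      have hx : arr.getD start 0 = x := by
        have h0 : arr[start]? = some x := by
          have h3 : (arr.drop start)[0]? = arr[start + 0]? := List.getElem?_drop
          rw [hd] at h3
          simpa using h3.symm
        rw [List.getD_eq_getElem?_getD, h0]
        rfl
      have hy : arr.getD (start + 1) 0 = y := by
        have h0 : arr[start + 1]? = some y := by
          have h3 : (arr.drop (start + 1))[0]? = arr[start + 1 + 0]? := List.getElem?_drop
          rw [h1] at h3
          simpa using h3.symm
        rw [List.getD_eq_getElem?_getD, h0]
        rfl
      have hdint : PySem.List.pyGetD arr ((start : Int) + 1) 0 - PySem.List.pyGetD arr (start : Int) 0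
          = y - x := by
        rw [show ((start : Int) + 1) = ((start + 1 : Nat) : Int) by omega,
          PySem.List.pyGetD_natCast, PySem.List.pyGetD_natCast, hx, hy]
      have hj : pvScan arr (y - x) (start + 2) = start + 2 + pvExt y (y - x) tl := by
        rw [pvScan_spec arr (y - x) (start + 2) (by omega),
          show start + 2 - 1 = start + 1 by omega, hy, htl]
      rw [pvBIdx, dif_pos h2]
      simp only [hdint, hj]
      rw [PySem.List.slice_natCast,
        show start + 2 + pvExt y (y - x) tl - start = 2 + pvExt y (y - x) tl by omega, hd,
        ih (start + 2 + pvExt y (y - x) tl) _ (by omega)]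
      have hdropj : arr.drop (start + 2 + pvExt y (y - x) tl) = tl.drop (pvExt y (y - x) tl) := by
        rw [← List.drop_drop (i := pvExt y (y - x) tl) (j := start + 2), htl]
      rw [hdropj]
      conv_rhs => rw [pvBLoop]
      rw [show (2 + pvExt y (y - x) tl) = (pvExt y (y - x) tl + 1) + 1 by omega]
      simp [List.take_succ_cons, List.drop_succ_cons]
    · rw [pvBIdx, dif_neg h2]
      by_cases hs : start < arr.length
      · obtain ⟨a, ha⟩ : ∃ a, arr.drop start = [a] := by
          cases hd : arr.drop start with
          | nil => have := congrArg List.length hd; simp at this; omega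
          | cons a t =>
            cases t with
            | nil => exact ⟨a, rfl⟩
            | cons b t2 => have := congrArg List.length hd; simp at this; omega
        rw [if_pos hs, PySem.List.slice_from_natCast, ha]
        simp [pvBLoop]
      · rw [if_neg hs, List.drop_eq_nil_of_le (by omega)]
        simp [pvBLoop]

-- ===== VERDICT (by name: the statement is the Claim_ definition above) =====
theorem split_arithmetic_sequence_spec : Claim_equal_split_arithmetic_sequence := by
  intro arr _
  unfold Spec_split_arithmetic_sequence
  cases arr with
  | nil => rfl
  | cons x tl =>
  cases tl with
  | nil => rfl
  | cons y l =>
    unfold split_arithmetic_sequence split_arithmetic_sequence_alt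
    have hlen : ¬ (PySem.List.len (x :: y :: l) < 2) := by
      simp only [PySem.List.len_eq, List.length_cons]
      omega
    rw [if_neg hlen]
    conv_rhs => rw [if_neg (show ¬((x :: y :: l).length < 2) by simp only [List.length_cons]; omega)]
    rw [pvBridge (x :: y :: l) (x :: y :: l).length 0 [] (by omega), List.drop_zero]
    rw [PySem.List.foldl_pyRange_pyGetD (xs := x :: y :: l) (a := 1) (d := 0)
      (f := pvAStep) (init := ([], [PySem.List.pyGetD (x :: y :: l) 0 0])) (by omega)]
    simp only [PySem.List.pyGetD_zero_cons, Int.toNat_one, List.drop_succ_cons, List.drop_zero,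
      List.foldl_cons]
    have hstep1 : pvAStep ([], [x]) y = ([], [x, y]) := by simp [pvAStep]
    rw [hstep1]
    exact pvMainLemma l.length l x y [] le_rfl
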